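-- pv_equiv track=rewrite | github.com/madhusedu/TweetAnalysis | preprocess.py | removeTrailingHashTags
-- ===== SOURCE A (Python) =====
-- def removeTrailingHashTags(words):
--     index = len(words)-1
--     for w in reversed(words):
--         if w.startswith('#'):
--             words[index] = ''
--         else:
--             break
--         index -= 1
--     return words
-- ===== SOURCE B (Python) =====
-- def removeTrailingHashTags(words):
--     # forward pass: index just past the LAST word that does not start with '#'
--     keep = 0
--     for i, w in enumerate(words):
--         if not w.startswith('#'):
--             keep = i + 1
--     words[keep:] = [''] * (len(words) - keep)
--     return words
-- ===== Notes on version B (the rewrite author's own statement) =====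
-- stated objective: alternative
-- what changed: B replaces A's reversed walk with early break by a forward left-to-right pass that tracks the index just past the last non-hashtag word, then blanks the suffix from that index; correctness rests on the trailing '#' run starting right after the last non-hashtag word.
import Mathlib
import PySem

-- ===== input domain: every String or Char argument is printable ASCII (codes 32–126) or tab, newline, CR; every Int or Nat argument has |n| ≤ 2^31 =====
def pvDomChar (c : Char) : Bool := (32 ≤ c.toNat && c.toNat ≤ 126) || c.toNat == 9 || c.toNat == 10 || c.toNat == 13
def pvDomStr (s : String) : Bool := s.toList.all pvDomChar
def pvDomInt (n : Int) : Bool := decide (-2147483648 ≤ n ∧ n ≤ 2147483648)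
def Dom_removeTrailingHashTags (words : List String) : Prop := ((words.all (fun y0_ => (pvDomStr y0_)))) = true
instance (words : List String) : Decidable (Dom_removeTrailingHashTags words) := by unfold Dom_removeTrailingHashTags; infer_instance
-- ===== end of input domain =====

-- B blanks the trailing-hashtag suffix by a FORWARD pass that tracks the index just past
-- the last non-hashtag word, instead of A's reversed walk with early break (objective:
-- alternative, same cost). Both Pythons mutate `words` in place and return the same
-- object; the theorems below are about the returned value (which both A and B also
-- leave as the final in-place state).

-- ===== PORT A =====
-- the for-loop over reversed(words) with early break; `index` is always in range
-- when the assignment runs (index = len-1 - #processed ≥ 0), so pySetD is exact here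
def removeTrailingHashTagsGo : List String → Int → List String → List String
  | [], _, ws => ws
  | w :: rest, index, ws =>
    if PySem.Str.startswith w "#" then
      removeTrailingHashTagsGo rest (index - 1) (PySem.List.pySetD ws index "")
    else ws

def removeTrailingHashTags (words : List String) : List String :=
  removeTrailingHashTagsGo words.reverse ((words.length : Int) - 1) words

-- ===== PORT B =====
-- `for i, w in enumerate(words): if not w.startswith('#'): keep = i + 1`
-- carried state is (keep, i); the fold is written as structural recursion
def removeTrailingHashTagsKeep : List String → Nat → Nat → Nat
  | [], keep, _ => keep
  | w :: rest, keep, i =>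
    removeTrailingHashTagsKeep rest (if PySem.Str.startswith w "#" then keep else i + 1) (i + 1)

-- words[keep:] = [''] * (len(words) - keep); return words
def removeTrailingHashTags_alt (words : List String) : List String :=
  let keep := removeTrailingHashTagsKeep words 0 0
  words.take keep ++ List.replicate (words.length - keep) ""

-- ===== PRECONDITION & SPEC =====
def Spec_removeTrailingHashTags (words : List String) (out : List String) : Prop := out = removeTrailingHashTags_alt words
instance (words : List String) (out : List String) : Decidable (Spec_removeTrailingHashTags words out) := by unfold Spec_removeTrailingHashTags; infer_instance

-- ===== CLAIM (what is proved, stated in full; the proofs are below) =====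
def Claim_equal_removeTrailingHashTags : Prop := ∀ (words : List String), Dom_removeTrailingHashTags words → Spec_removeTrailingHashTags words (removeTrailingHashTags words)

-- ===== LEMMAS AND PROOFS =====

-- k ws = length of the maximal trailing run of '#'-starting words
def pvK (ws : List String) : Nat :=
  (ws.reverse.takeWhile (fun w => PySem.Str.startswith w "#")).length

lemma pvK_le (ws : List String) : pvK ws ≤ ws.length := by
  have h := (List.takeWhile_prefix (l := ws.reverse)
    (p := fun w => PySem.Str.startswith w "#")).length_le
  simpa [pvK] using h

lemma pvK_append_hash (ys : List String) (y : String)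
    (h : PySem.Str.startswith y "#" = true) : pvK (ys ++ [y]) = pvK ys + 1 := by
  have hc : PySem.Chars.startswith y.toList ['#'] = true := by simpa using h
  simp [pvK, hc]

lemma pvK_append_nothash (ys : List String) (y : String)
    (h : PySem.Str.startswith y "#" = false) : pvK (ys ++ [y]) = 0 := by
  have hc : PySem.Chars.startswith y.toList ['#'] = false := by simpa using h
  simp [pvK, hc]

-- characterisation of A's loop, generalized over an already-blanked tail t
lemma goA_spec (xs : List String) : ∀ t : List String,
    removeTrailingHashTagsGo xs.reverse ((xs.length : Int) - 1) (xs ++ t)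
      = xs.take (xs.length - pvK xs) ++ List.replicate (pvK xs) "" ++ t := by
  induction xs using List.reverseRecOn with
  | nil => intro t; simp [removeTrailingHashTagsGo, pvK]
  | append_singleton ys y ih =>
    intro t
    rw [List.reverse_append]
    simp only [List.reverse_singleton, List.singleton_append]
    by_cases h : PySem.Str.startswith y "#" = true
    · have hk := pvK_append_hash ys y h
      have hlen : (((ys ++ [y]).length : Int) - 1) = (ys.length : Int) := by
        simp
      rw [removeTrailingHashTagsGo, if_pos h, hlen]
      have hset : PySem.List.pySetD ((ys ++ [y]) ++ t) (ys.length : Int) ""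
          = ys ++ ("" :: t) := by
        rw [PySem.List.pySetD_natCast]
        rw [List.append_assoc, List.set_append_right _ _ (le_refl ys.length)]
        simp
      rw [hset]
      have ih' := ih ("" :: t)
      rw [show (ys.length : Int) - 1 = ((ys.length : Int) - 1) from rfl, ih']
      have hkle := pvK_le ys
      rw [hk]
      have h1 : (ys ++ [y]).length - (pvK ys + 1) = ys.length - pvK ys := by
        simp [List.length_append]
      rw [h1, List.take_append_of_le_length (by omega)]
      have h2 : List.replicate (pvK ys + 1) ("" : String)
          = List.replicate (pvK ys) "" ++ [""] := by
        simp [List.replicate_succ']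
      rw [h2]
      simp
    · have h' : PySem.Str.startswith y "#" = false := by simpa using h
      rw [removeTrailingHashTagsGo, if_neg (by simpa using h')]
      rw [pvK_append_nothash ys y h']
      rw [Nat.sub_zero, List.take_of_length_le (by simp)]
      simp

-- B's forward fold: processing one more element at the end is one more step
lemma keep_append (ys : List String) (y : String) :
    ∀ k i, removeTrailingHashTagsKeep (ys ++ [y]) k i
      = (if PySem.Str.startswith y "#" then removeTrailingHashTagsKeep ys k i
         else i + ys.length + 1) := by
  induction ys with
  | nil => intro k i; simp [removeTrailingHashTagsKeep]
  | cons w rest ih =>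
    intro k i
    rw [List.cons_append, removeTrailingHashTagsKeep, removeTrailingHashTagsKeep, ih]
    split <;> simp <;> omega

lemma keep_eq (ws : List String) :
    removeTrailingHashTagsKeep ws 0 0 = ws.length - pvK ws := by
  induction ws using List.reverseRecOn with
  | nil => simp [removeTrailingHashTagsKeep, pvK]
  | append_singleton ys y ih =>
    rw [keep_append]
    by_cases h : PySem.Str.startswith y "#" = true
    · have hkle := pvK_le ys
      rw [if_pos h, ih, pvK_append_hash ys y h]
      simp only [List.length_append, List.length_cons, List.length_nil]
      omega
    · have h' : PySem.Str.startswith y "#" = false := by simpa using h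
      rw [if_neg (by simpa using h'), pvK_append_nothash ys y h']
      simp

-- ===== VERDICT (by name: the statement is the Claim_ definition above) =====
theorem removeTrailingHashTags_spec : Claim_equal_removeTrailingHashTags := by
  intro words _
  unfold Spec_removeTrailingHashTags removeTrailingHashTags removeTrailingHashTags_alt
  have hA := goA_spec words []
  rw [List.append_nil] at hA
  have hk := pvK_le words
  have h1 : words.length - (words.length - pvK words) = pvK words := by omega
  rw [hA]
  simp only [keep_eq, h1, List.append_nil]
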